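-- pv_equiv track=rewrite | github.com/inforin/TabAF | evaluation/scorer_utils.py | cal_correct_by_vote
-- ===== SOURCE A (Python) =====
-- from collections import Counter, defaultdict
--
-- def not_force_answer(f_predict):
--     return 'Formula Exectution Error' not in str(f_predict) and f_predict is not None and f_predict != -2146826238 and str(f_predict) != '0.0'
--
-- def cal_correct_by_vote(corrects):
--     except_corrects = [[a, b, c] for a, b, c in corrects if not_force_answer(b)]
--     if except_corrects:
--         b_count = Counter(b for a, b, c in except_corrects)
--         most_common_b = b_count.most_common(1)[0][0]
--         correct = next(a for a, b, c in corrects if b == most_common_b)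
--     else:
--         correct = corrects[0][0]
--     return correct
-- ===== SOURCE B (Python) =====
-- def not_force_answer(f_predict):
--     return 'Formula Exectution Error' not in str(f_predict) and f_predict is not None and f_predict != -2146826238 and str(f_predict) != '0.0'
--
-- def cal_correct_by_vote(corrects):
--     # brute-force: no Counter, no dict, no filtered intermediate list, no rescan.
--     # For each entry whose b passes the filter, recount b's frequency by a nested
--     # scan (entries sharing a b share its filter status, so counting over the whole
--     # list equals counting over the filtered one) and keep the answer of the first
--     # entry achieving a strictly larger count — i.e. the first-seen majority b.
--     best_a, best_n = None, 0
--     for a, b, c in corrects: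
--         if not_force_answer(b):
--             n = sum(1 for _, b2, _ in corrects if b2 == b)
--             if n > best_n:
--                 best_a, best_n = a, n
--     if best_a is None:
--         return corrects[0][0]
--     return best_a
-- ===== Notes on version B (the rewrite author's own statement) =====
-- stated objective: alternative
-- what changed: Replaces A's Counter + most_common + next() rescan pipeline by a dictionary-free brute force: one fold over the entries that, for each entry passing the filter, recounts its b's frequency with a nested scan over the whole list and keeps the answer of the first entry with a strictly larger count, so no filtered intermediate list, no hash counter and no rescan exist.
-- outside the precondition, e.g. on cal_correct_by_vote([]): A raises IndexError, B raises IndexError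
import Mathlib
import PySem

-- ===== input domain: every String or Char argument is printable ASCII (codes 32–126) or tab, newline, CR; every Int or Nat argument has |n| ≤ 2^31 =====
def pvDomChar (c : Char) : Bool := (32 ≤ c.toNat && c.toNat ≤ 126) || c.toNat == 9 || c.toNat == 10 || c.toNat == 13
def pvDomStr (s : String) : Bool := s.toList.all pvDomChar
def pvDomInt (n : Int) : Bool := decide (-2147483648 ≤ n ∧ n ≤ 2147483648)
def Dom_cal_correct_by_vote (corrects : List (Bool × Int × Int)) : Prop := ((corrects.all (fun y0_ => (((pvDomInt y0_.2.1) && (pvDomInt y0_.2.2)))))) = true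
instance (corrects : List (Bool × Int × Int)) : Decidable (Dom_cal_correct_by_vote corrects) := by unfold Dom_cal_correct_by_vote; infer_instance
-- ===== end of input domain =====

-- B replaces A's Counter + most_common + rescan by a dictionary-free brute force:
-- one fold that recounts each passing b by a nested scan and keeps the first
-- strictly-better answer (objective: alternative algorithm, no auxiliary structures).

-- ===== PORT A =====
-- not_force_answer(b) for an int b (str(int) never contains the error marker nor equals '0.0')
def notForceAnswer (b : Int) : Bool :=
  !(PySem.Str.isIn "Formula Exectution Error" (PySem.Int.toStr b))
    && !(b == -2146826238) && !(PySem.Int.toStr b == "0.0")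

def cal_correct_by_vote (corrects : List (Bool × Int × Int)) : Bool :=
  let except_corrects := corrects.filter (fun t => notForceAnswer t.2.1)
  if except_corrects ≠ [] then
    let b_count := PySem.Dict.counter (except_corrects.map (fun t => t.2.1))
    -- most_common(1)[0][0]: the first key of maximal count (nlargest(1) is stable)
    let most_common_b := match PySem.List.max? b_count.items (fun p => p.2) with
      | some p => p.1
      | none => 0      -- unreachable: the counter is nonempty here
    match corrects.find? (fun t => t.2.1 == most_common_b) with
    | some t => t.1
    | none => false     -- unreachable: most_common_b occurs in corrects
  else
    match corrects with
    | t :: _ => t.1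
    | [] => false       -- corrects[0] raises IndexError: excluded by Pre_

-- ===== PORT B =====
def cal_correct_by_vote_alt (corrects : List (Bool × Int × Int)) : Bool :=
  let r := corrects.foldl
    (fun (acc : Option Bool × Int) t =>
      if notForceAnswer t.2.1 then
        -- n = sum(1 for _, b2, _ in corrects if b2 == b): a count over the whole list
        let n : Int := (corrects.countP (fun u => u.2.1 == t.2.1) : Int)
        if n > acc.2 then (some t.1, n) else acc
      else acc)
    (none, 0)
  match r.1 with
  | some a => a
  | none =>
    match corrects with
    | t :: _ => t.1
    | [] => false       -- corrects[0] raises IndexError: excluded by Pre_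

-- ===== PRECONDITION & SPEC =====
-- A (and B) raise IndexError on the empty list (corrects[0]); excluded.
def Pre_cal_correct_by_vote (corrects : List (Bool × Int × Int)) : Prop := corrects ≠ []
instance (corrects : List (Bool × Int × Int)) : Decidable (Pre_cal_correct_by_vote corrects) := by unfold Pre_cal_correct_by_vote; infer_instance
def pvWitness_cal_correct_by_vote : (List (Bool × Int × Int)) := [(true, 3, 0), (false, 3, 1), (true, 2, 2)]

def Spec_cal_correct_by_vote (corrects : List (Bool × Int × Int)) (out : Bool) : Prop := out = cal_correct_by_vote_alt corrects
instance (corrects : List (Bool × Int × Int)) (out : Bool) : Decidable (Spec_cal_correct_by_vote corrects out) := by unfold Spec_cal_correct_by_vote; infer_instance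

-- ===== CLAIM (what is proved, stated in full; the proofs are below) =====
def Claim_equal_cal_correct_by_vote : Prop := ∀ (corrects : List (Bool × Int × Int)), Dom_cal_correct_by_vote corrects → Pre_cal_correct_by_vote corrects → Spec_cal_correct_by_vote corrects (cal_correct_by_vote corrects)

-- ===== LEMMAS AND PROOFS =====
lemma pvFindFilter {α : Type} (p q : α → Bool) (h : ∀ x, p x = true → q x = true)
    (l : List α) : (l.filter q).find? p = l.find? p := by
  induction l with
  | nil => rfl
  | cons x l ih =>
    by_cases hq : q x = true
    · rw [List.filter_cons, if_pos hq]
      cases hp : p x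
      · rw [List.find?_cons_of_neg (by simp [hp]), List.find?_cons_of_neg (by simp [hp]), ih]
      · rw [List.find?_cons_of_pos hp, List.find?_cons_of_pos hp]
    · have hp : p x = false := by
        cases hpx : p x
        · rfl
        · exact absurd (h x hpx) hq
      rw [List.filter_cons, if_neg hq, List.find?_cons_of_neg (by simp [hp]), ih]

-- first a in l whose b equals k (default false for absent k)
def pvFA (l : List (Bool × Int × Int)) (k : Int) : Bool :=
  ((l.find? (fun t => t.2.1 == k)).map (·.1)).getD false
lemma pvFA_append_of_mem (l : List (Bool × Int × Int)) (t : Bool × Int × Int) (k : Int)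
    (h : k ∈ l.map (fun t => t.2.1)) : pvFA (l ++ [t]) k = pvFA l k := by
  obtain ⟨x, hx, hk⟩ := List.mem_map.mp h
  have hs : (l.find? (fun t => t.2.1 == k)).isSome := by
    rw [List.find?_isSome]
    exact ⟨x, hx, by simp [hk]⟩
  unfold pvFA
  rw [List.find?_append, Option.or_of_isSome hs]
lemma pvFind_eq_none_of_not_mem (l : List (Bool × Int × Int)) (k : Int)
    (h : k ∉ l.map (fun t => t.2.1)) : l.find? (fun t => t.2.1 == k) = none := by
  rw [List.find?_eq_none]
  intro x hx
  simp only [beq_iff_eq]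
  intro hk
  exact h (List.mem_map.mpr ⟨x, hx, hk⟩)
lemma pvFA_append_last (l : List (Bool × Int × Int)) (t : Bool × Int × Int)
    (h : t.2.1 ∉ l.map (fun t => t.2.1)) : pvFA (l ++ [t]) t.2.1 = t.1 := by
  unfold pvFA
  rw [List.find?_append, pvFind_eq_none_of_not_mem l t.2.1 h]
  simp [List.find?]

lemma pvMaxMap {α β : Type} (g : α → β) (key : β → Int) (xs : List α) :
    PySem.List.max? (xs.map g) key = (PySem.List.max? xs (fun a => key (g a))).map g := by
  unfold PySem.List.max?
  rw [List.foldl_map]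
  suffices h : ∀ (acc : Option α),
      List.foldl (fun acc x => match acc with
        | none => some (g x)
        | some m => if key m < key (g x) then some (g x) else some m) (acc.map g) xs
      = (List.foldl (fun acc x => match acc with
        | none => some x
        | some m => if key (g m) < key (g x) then some x else some m) acc xs).map g by
    exact h none
  induction xs with
  | nil => intro acc; rfl
  | cons x xs ih =>
    intro acc
    cases acc with
    | none => exact ih (some x)
    | some m =>
      simp only [List.foldl_cons]
      have h2 := ih (if key (g m) < key (g x) then some x else some m)
      rw [apply_ite (Option.map g)] at h2
      exact h2

lemma pvMaxCongrAux {α : Type} (f g : α → Int) (xs : List α)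
    (h : ∀ x ∈ xs, f x = g x) :
    ∀ (acc : Option α), (∀ m, acc = some m → f m = g m) →
      List.foldl (fun acc x => match acc with
        | none => some x
        | some m => if f m < f x then some x else some m) acc xs
      = List.foldl (fun acc x => match acc with
        | none => some x
        | some m => if g m < g x then some x else some m) acc xs := by
  induction xs with
  | nil => intro acc _; rfl
  | cons x xs ih =>
    intro acc hacc
    have hx : f x = g x := h x List.mem_cons_self
    have hrest : ∀ y ∈ xs, f y = g y := fun y hy => h y (List.mem_cons_of_mem _ hy)
    cases acc with
    | none =>
      simp only [List.foldl_cons]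
      exact ih hrest (some x) (by rintro m ⟨rfl⟩; exact hx)
    | some m =>
      have hm : f m = g m := hacc m rfl
      simp only [List.foldl_cons, hm, hx]
      apply ih hrest
      rintro m' hm'
      split at hm'
      · cases hm'; exact hx
      · cases hm'; exact hm

lemma pvMaxCongr {α : Type} (f g : α → Int) (xs : List α) (h : ∀ x ∈ xs, f x = g x) :
    PySem.List.max? xs f = PySem.List.max? xs g := by
  unfold PySem.List.max?
  exact pvMaxCongrAux f g xs h none (by rintro m ⟨⟩)

lemma pvMaxAppend_none {α : Type} (c : α → Int) (S : List α) (k : α)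
    (h : PySem.List.max? S c = none) : PySem.List.max? (S ++ [k]) c = some k := by
  unfold PySem.List.max? at h ⊢
  rw [List.foldl_append, h]
  rfl

lemma pvMaxAppend_some {α : Type} (c : α → Int) (S : List α) (k m : α)
    (h : PySem.List.max? S c = some m) :
    PySem.List.max? (S ++ [k]) c = if c m < c k then some k else some m := by
  unfold PySem.List.max? at h ⊢
  rw [List.foldl_append, h]
  rfl

lemma pvScanB (c : Int → Int) (p : List (Bool × Int × Int))
    (hpos : ∀ t ∈ p, 0 < c t.2.1) :
    p.foldl (fun (acc : Option Bool × Int) t =>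
        if c t.2.1 > acc.2 then (some t.1, c t.2.1) else acc) ((none : Option Bool), (0:Int))
    = match PySem.List.max? (PySem.Set.ofList (p.map (fun t => t.2.1))) c with
      | none => ((none : Option Bool), (0:Int))
      | some m => (some (pvFA p m), c m) := by
  induction p using List.reverseRecOn with
  | nil => rfl
  | append_singleton p t ih =>
    have hpos' : ∀ u ∈ p, 0 < c u.2.1 := fun u hu => hpos u (List.mem_append_left _ hu)
    have hbs : (p ++ [t]).map (fun t => t.2.1) = p.map (fun t => t.2.1) ++ [t.2.1] := by simp
    have hSapp : PySem.Set.ofList (p.map (fun t => t.2.1) ++ [t.2.1])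
        = PySem.Set.add (PySem.Set.ofList (p.map (fun t => t.2.1))) t.2.1 := by
      rw [PySem.Set.ofList_eq_foldl, PySem.Set.ofList_eq_foldl, List.foldl_append]
      rfl
    rw [List.foldl_append, List.foldl_cons, List.foldl_nil, ih hpos', hbs, hSapp]
    by_cases hmem : t.2.1 ∈ p.map (fun t => t.2.1)
    · -- b already seen: the distinct set is unchanged
      have hmemS : t.2.1 ∈ PySem.Set.ofList (p.map (fun t => t.2.1)) :=
        (PySem.Set.mem_ofList _ _).mpr hmem
      have hS : PySem.Set.add (PySem.Set.ofList (p.map (fun t => t.2.1))) t.2.1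
          = PySem.Set.ofList (p.map (fun t => t.2.1)) := by
        unfold PySem.Set.add
        rw [if_pos ((PySem.Set.contains_iff _ _).mpr hmemS)]
      rw [hS]
      obtain ⟨m, hm⟩ : ∃ m, PySem.List.max? (PySem.Set.ofList (p.map (fun t => t.2.1))) c = some m := by
        cases hx : PySem.List.max? (PySem.Set.ofList (p.map (fun t => t.2.1))) c with
        | none =>
          exfalso
          have := (PySem.List.max?_eq_none_iff _ _).mp hx
          exact absurd (this ▸ hmemS) (List.not_mem_nil)
        | some m => exact ⟨m, rfl⟩
      have hle : c t.2.1 ≤ c m := PySem.List.max?_isMax hm _ hmemS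
      have hmbs : m ∈ p.map (fun t => t.2.1) :=
        (PySem.Set.mem_ofList _ _).mp (PySem.List.max?_mem hm)
      simp only [hm]
      rw [if_neg (by omega), pvFA_append_of_mem p t m hmbs]
    · -- new b: appended to the distinct set
      have hnotS : t.2.1 ∉ PySem.Set.ofList (p.map (fun t => t.2.1)) :=
        fun h => hmem ((PySem.Set.mem_ofList _ _).mp h)
      have hS : PySem.Set.add (PySem.Set.ofList (p.map (fun t => t.2.1))) t.2.1
          = PySem.Set.ofList (p.map (fun t => t.2.1)) ++ [t.2.1] := by
        unfold PySem.Set.add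
        rw [if_neg (by simp [hnotS])]
      rw [hS]
      cases hx : PySem.List.max? (PySem.Set.ofList (p.map (fun t => t.2.1))) c with
      | none =>
        have hcpos : 0 < c t.2.1 := hpos t (List.mem_append_right _ List.mem_cons_self)
        simp [pvMaxAppend_none c _ t.2.1 hx, pvFA_append_last p t hmem, hcpos]
      | some m =>
        have hmbs : m ∈ p.map (fun t => t.2.1) :=
          (PySem.Set.mem_ofList _ _).mp (PySem.List.max?_mem hx)
        by_cases hlt : c m < c t.2.1
        · simp [pvMaxAppend_some c _ t.2.1 m hx, hlt, pvFA_append_last p t hmem]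
        · simp [pvMaxAppend_some c _ t.2.1 m hx, hlt, pvFA_append_of_mem p t m hmbs]

lemma pvCountGlobal (corrects : List (Bool × Int × Int)) (k : Int)
    (hk : notForceAnswer k = true) :
    corrects.countP (fun u => u.2.1 == k)
      = ((corrects.filter (fun t => notForceAnswer t.2.1)).map (fun t => t.2.1)).count k := by
  rw [List.count_eq_countP, List.countP_map, List.countP_filter]
  apply List.countP_congr
  intro u _
  simp only [Function.comp_apply]
  by_cases h : u.2.1 = k
  · simp [h, hk]
  · simp [h]

-- ===== VERDICT helper: the full equivalence =====
lemma pvMain (corrects : List (Bool × Int × Int)) (_hne : corrects ≠ []) :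
    cal_correct_by_vote corrects = cal_correct_by_vote_alt corrects := by
  set l := corrects.filter (fun t => notForceAnswer t.2.1) with hldef
  set bs := l.map (fun t => t.2.1) with hbsdef
  set c : Int → Int := fun k => ((corrects.countP (fun u => u.2.1 == k) : Nat) : Int) with hcdef
  have hfoldfilter :
      corrects.foldl
        (fun (acc : Option Bool × Int) t =>
          if notForceAnswer t.2.1 then
            let n : Int := (corrects.countP (fun u => u.2.1 == t.2.1) : Int)
            if n > acc.2 then (some t.1, n) else acc
          else acc)
        (none, 0)
      = l.foldl (fun (acc : Option Bool × Int) t =>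
          if c t.2.1 > acc.2 then (some t.1, c t.2.1) else acc) (none, 0) := by
    rw [hldef, List.foldl_filter]
  have hpos : ∀ t ∈ l, 0 < c t.2.1 := by
    intro t ht
    have htc : t ∈ corrects := List.mem_of_mem_filter ht
    have : 0 < corrects.countP (fun u => u.2.1 == t.2.1) :=
      List.countP_pos_iff.mpr ⟨t, htc, by simp⟩
    simp only [hcdef]
    exact_mod_cast this
  have hscan := pvScanB c l hpos
  by_cases hl : l = []
  · simp only [cal_correct_by_vote, cal_correct_by_vote_alt, ← hldef, hfoldfilter, hl,
      List.foldl_nil]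
    rw [if_neg (by simp)]
  · have hbsne : bs ≠ [] := by simpa [hbsdef, List.map_eq_nil_iff] using hl
    have hkey : ∀ k ∈ PySem.Set.ofList bs, (bs.count k : Int) = c k := by
      intro k hk
      have hkbs : k ∈ bs := (PySem.Set.mem_ofList _ _).mp hk
      obtain ⟨t', ht', hkk⟩ := List.mem_map.mp hkbs
      have hnf : notForceAnswer k = true := by
        have := List.of_mem_filter ht'
        rwa [hkk] at this
      simp only [hcdef]
      rw [pvCountGlobal corrects k hnf, ← hldef, ← hbsdef]
    obtain ⟨m, hm⟩ : ∃ m, PySem.List.max? (PySem.Set.ofList bs) (fun k => (bs.count k : Int)) = some m := by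
      cases hx : PySem.List.max? (PySem.Set.ofList bs) (fun k => (bs.count k : Int)) with
      | none =>
        exfalso
        have hSnil := (PySem.List.max?_eq_none_iff _ _).mp hx
        obtain ⟨b0, hb0⟩ := List.exists_mem_of_ne_nil bs hbsne
        exact absurd (hSnil ▸ (PySem.Set.mem_ofList _ _).mpr hb0) (List.not_mem_nil)
      | some m => exact ⟨m, rfl⟩
    have hmc : PySem.List.max? (PySem.Set.ofList bs) c = some m := by
      rw [← pvMaxCongr _ _ _ hkey]
      exact hm
    have hmS : m ∈ PySem.Set.ofList bs := PySem.List.max?_mem hm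
    have hmbs : m ∈ bs := (PySem.Set.mem_ofList _ _).mp hmS
    have hnfm : notForceAnswer m = true := by
      obtain ⟨t', ht', hk⟩ := List.mem_map.mp hmbs
      have := List.of_mem_filter ht'
      rwa [hk] at this
    have hfind : corrects.find? (fun t => t.2.1 == m) = l.find? (fun t => t.2.1 == m) := by
      rw [hldef]
      exact (pvFindFilter _ _ (by
        intro x hx
        have hxm : x.2.1 = m := by simpa using hx
        rw [hxm]; exact hnfm) corrects).symm
    obtain ⟨t0, ht0⟩ : ∃ t0, l.find? (fun t => t.2.1 == m) = some t0 := by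
      obtain ⟨t', ht', hk⟩ := List.mem_map.mp hmbs
      have hss : (l.find? (fun t => t.2.1 == m)).isSome := by
        rw [List.find?_isSome]
        exact ⟨t', ht', by simp [hk]⟩
      exact Option.isSome_iff_exists.mp hss
    -- A's side
    have hA : cal_correct_by_vote corrects = t0.1 := by
      simp only [cal_correct_by_vote, ← hldef, ← hbsdef]
      rw [if_pos hl]
      rw [PySem.Dict.items_counter bs]
      rw [pvMaxMap (fun k => (k, (bs.count k : Int))) (fun p => p.2) (PySem.Set.ofList bs)]
      simp only [hm, Option.map_some, hfind, ht0]
    -- B's side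
    have hB : cal_correct_by_vote_alt corrects = t0.1 := by
      simp only [cal_correct_by_vote_alt, hfoldfilter, ← hbsdef, hscan, hmc]
      unfold pvFA
      rw [ht0]
      rfl
    rw [hA, hB]

-- ===== VERDICT (by name: the statement is the Claim_ definition above) =====
theorem cal_correct_by_vote_spec : Claim_equal_cal_correct_by_vote := by
  intro corrects _ hne
  unfold Spec_cal_correct_by_vote
  exact pvMain corrects hne
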